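-- pv_equiv track=rewrite | github.com/vergotten/news-aggregator-pro | run_scraper.py | parse_urls
-- ===== SOURCE A (Python) =====
-- from typing import List, Optional, Dict
--
-- def parse_urls(raw_urls: List[str]) -> List[str]:
--     """Нормализовать список URL: разделение по запятым."""
--     result = []
--     for item in raw_urls:
--         for url in item.split(','):
--             url = url.strip()
--             if url:
--                 result.append(url)
--     return result
-- ===== SOURCE B (Python) =====
-- def parse_urls(raw_urls):
--     """Нормализовать список URL: разделение по запятым."""
--     result = []
--     buf = []
--
--     def flush():
--         i, j = 0, len(buf)
--         while i < j and buf[i].isspace():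
--             i += 1
--         while j > i and buf[j - 1].isspace():
--             j -= 1
--         if i < j:
--             result.append(''.join(buf[i:j]))
--         buf.clear()
--
--     for item in raw_urls:
--         for ch in item:
--             if ch == ',':
--                 flush()
--             else:
--                 buf.append(ch)
--         flush()
--     return result
-- ===== Notes on version B (the rewrite author's own statement) =====
-- stated objective: alternative
-- what changed: Replaces split()/strip() calls with an explicit character-level scanner: one buffer accumulated char by char, flushed at each comma and at end of item, with manual index-based trimming of whitespace at flush time.
import Mathlib
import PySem

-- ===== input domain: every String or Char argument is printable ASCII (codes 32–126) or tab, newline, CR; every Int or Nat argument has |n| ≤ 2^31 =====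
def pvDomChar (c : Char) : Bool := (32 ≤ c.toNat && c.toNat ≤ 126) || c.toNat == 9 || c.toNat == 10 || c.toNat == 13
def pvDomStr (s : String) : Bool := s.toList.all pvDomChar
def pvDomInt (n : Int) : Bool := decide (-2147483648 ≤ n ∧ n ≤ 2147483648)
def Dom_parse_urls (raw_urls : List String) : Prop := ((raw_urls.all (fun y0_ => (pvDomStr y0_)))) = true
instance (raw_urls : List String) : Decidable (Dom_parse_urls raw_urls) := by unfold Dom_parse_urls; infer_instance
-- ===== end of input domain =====

-- B replaces A's split()/strip() calls by an explicit character-level scanner with one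
-- buffer, flushed (with manual end-trimming) at each comma and at end of each item
-- (objective: alternative; same asymptotic cost).

-- ===== PORT A =====
def parse_urls (raw_urls : List String) : List String :=
  raw_urls.foldl (fun result item =>
    ((PySem.Str.split? item ",").getD []).foldl (fun result url =>
      let url := PySem.Str.strip url
      if url ≠ "" then result ++ [url] else result) result) []

-- ===== PORT B =====
-- B's flush(): the two index while-loops trim whitespace from the two ends of the
-- buffer (= dropWhile isspace on each end), then the non-empty remainder is appended.
def pvFlush (result : List String) (buf : List Char) : List String :=
  let t := ((buf.dropWhile PySem.Chars.isspace).reverse.dropWhile PySem.Chars.isspace).reverse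
  if t ≠ [] then result ++ [String.ofList t] else result

def parse_urls_alt (raw_urls : List String) : List String :=
  (raw_urls.foldl (fun (st : List String × List Char) item =>
      let st2 := item.toList.foldl (fun (st : List String × List Char) ch =>
        if ch = ',' then (pvFlush st.1 st.2, []) else (st.1, st.2 ++ [ch])) st
      (pvFlush st2.1 st2.2, ([] : List Char)))
    (([] : List String), ([] : List Char))).1

-- ===== PRECONDITION & SPEC =====
def Spec_parse_urls (raw_urls : List String) (out : List String) : Prop := out = parse_urls_alt raw_urls
instance (raw_urls : List String) (out : List String) : Decidable (Spec_parse_urls raw_urls out) := by unfold Spec_parse_urls; infer_instance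

-- ===== CLAIM (what is proved, stated in full; the proofs are below) =====
def Claim_equal_parse_urls : Prop := ∀ (raw_urls : List String), Dom_parse_urls raw_urls → Spec_parse_urls raw_urls (parse_urls raw_urls)

-- ===== LEMMAS AND PROOFS =====

-- structural recursion computing Python's split on the single-char separator ','
def mySplit : List Char → List (List Char)
  | [] => [[]]
  | c :: rest => if c = ',' then [] :: mySplit rest else (mySplit rest).modifyHead (c :: ·)

-- the per-piece work both programs do, at the List Char level
def tok (l : List Char) : List String :=
  (((mySplit l).map String.ofList).map PySem.Str.strip).filter (fun u => u ≠ "")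

lemma mySplit_ne_nil (l : List Char) : mySplit l ≠ [] := by
  induction l with
  | nil => simp [mySplit]
  | cons c rest ih =>
    simp only [mySplit]
    split
    · simp
    · cases h : mySplit rest with
      | nil => exact absurd h ih
      | cons a t => simp [List.modifyHead]

lemma go_eq : ∀ (fuel : Nat) (l cur : List Char) (acc : List (List Char)), l.length ≤ fuel →
    PySem.Chars.splitOn.go [','] fuel l cur acc
      = acc.reverse ++ (mySplit l).modifyHead (cur.reverse ++ ·) := by
  intro fuel
  induction fuel with
  | zero =>
    intro l cur acc h
    have : l = [] := by cases l <;> simp_all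
    subst this
    simp [PySem.Chars.splitOn.go, mySplit]
  | succ f ih =>
    intro l cur acc h
    cases l with
    | nil => simp [PySem.Chars.splitOn.go, mySplit]
    | cons c rest =>
      by_cases hc : c = ','
      · subst hc
        have hp : List.isPrefixOf [','] (',' :: rest) = true := by simp [List.isPrefixOf]
        rw [show PySem.Chars.splitOn.go [','] (f+1) (',' :: rest) cur acc
            = PySem.Chars.splitOn.go [','] f (List.drop 1 (',' :: rest)) [] (cur.reverse :: acc) by
          simp [PySem.Chars.splitOn.go, hp]]
        rw [ih _ _ _ (by simpa using Nat.le_of_succ_le_succ (by simpa using h))]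
        cases h' : mySplit rest with
        | nil => exact absurd h' (mySplit_ne_nil rest)
        | cons a t => simp [mySplit, List.modifyHead, h']
      · have hp : List.isPrefixOf [','] (c :: rest) = false := by
          simp [List.isPrefixOf]; exact fun h' => absurd h'.symm hc
        rw [show PySem.Chars.splitOn.go [','] (f+1) (c :: rest) cur acc
            = PySem.Chars.splitOn.go [','] f rest (c :: cur) acc by
          simp [PySem.Chars.splitOn.go, hp]]
        rw [ih _ _ _ (by simpa using Nat.le_of_succ_le_succ (by simpa using h))]
        simp only [mySplit, if_neg hc]
        cases h' : mySplit rest with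
        | nil => exact absurd h' (mySplit_ne_nil rest)
        | cons a t => simp [List.modifyHead]

lemma splitOn_eq_mySplit (l : List Char) : PySem.Chars.splitOn l [','] = mySplit l := by
  rw [show PySem.Chars.splitOn l [','] = PySem.Chars.splitOn.go [','] (l.length + 1) l [] [] from rfl]
  rw [go_eq _ _ _ _ (Nat.le_succ _)]
  cases h : mySplit l with
  | nil => exact absurd h (mySplit_ne_nil l)
  | cons a t => simp [List.modifyHead]

lemma split_comma (s : String) :
    (PySem.Str.split? s ",").getD [] = (mySplit s.toList).map String.ofList := by
  simp [PySem.Str.split?, PySem.Chars.split?, show ("," : String).toList = [','] from rfl,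
    splitOn_eq_mySplit]

lemma inner_fold (xs acc : List String) :
    xs.foldl (fun result url =>
        let url := PySem.Str.strip url
        if url ≠ "" then result ++ [url] else result) acc
      = acc ++ (xs.map PySem.Str.strip).filter (fun u => u ≠ "") := by
  have h := PySem.List.foldl_append_if (fun u => decide (PySem.Str.strip u ≠ "")) PySem.Str.strip xs acc
  simp only [decide_eq_true_eq] at h
  rw [h, List.filter_map]
  rfl

lemma strip_ofList (l : List Char) :
    PySem.Str.strip (String.ofList l) = String.ofList (PySem.Chars.strip l) := by
  rw [← String.toList_inj]; simp

lemma flush_eq (res : List String) (buf : List Char) :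
    pvFlush res buf = res ++ (([String.ofList buf].map PySem.Str.strip).filter (fun u => u ≠ "")) := by
  have ht : ((buf.dropWhile PySem.Chars.isspace).reverse.dropWhile PySem.Chars.isspace).reverse
      = PySem.Chars.strip buf := rfl
  have hemp : String.ofList (PySem.Chars.strip buf) = "" ↔ PySem.Chars.strip buf = [] := by
    rw [← String.toList_inj]; simp
  simp only [pvFlush, ht, List.map, List.filter, strip_ofList]
  by_cases h : PySem.Chars.strip buf = []
  · simp [h]
  · simp [h, hemp]

lemma tok_cons_head (a : List Char) (t : List (List Char)) :
    (((a :: t).map String.ofList).map PySem.Str.strip).filter (fun u => u ≠ "")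
      = (([String.ofList a].map PySem.Str.strip).filter (fun u => u ≠ ""))
        ++ ((t.map String.ofList).map PySem.Str.strip).filter (fun u => u ≠ "") := by
  simp [List.filter]
  split <;> simp

-- the inner character loop of B followed by the end-of-item flush
lemma scan (l : List Char) : ∀ (res : List String) (buf : List Char),
    pvFlush (l.foldl (fun (st : List String × List Char) ch =>
        if ch = ',' then (pvFlush st.1 st.2, []) else (st.1, st.2 ++ [ch])) (res, buf)).1
      (l.foldl (fun (st : List String × List Char) ch =>
        if ch = ',' then (pvFlush st.1 st.2, []) else (st.1, st.2 ++ [ch])) (res, buf)).2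
    = res ++ ((((mySplit l).modifyHead (buf ++ ·)).map String.ofList).map
        PySem.Str.strip).filter (fun u => u ≠ "") := by
  induction l with
  | nil =>
    intro res buf
    simpa [mySplit, List.modifyHead] using flush_eq res buf
  | cons c rest ih =>
    intro res buf
    by_cases hc : c = ','
    · subst hc
      simp only [List.foldl_cons, reduceIte]
      rw [ih (pvFlush res buf) []]
      rw [flush_eq res buf]
      have hm : (mySplit (',' :: rest)).modifyHead (buf ++ ·) = buf :: mySplit rest := by
        simp [mySplit, List.modifyHead]
      have hm2 : (mySplit rest).modifyHead (([] : List Char) ++ ·) = mySplit rest := by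
        cases h' : mySplit rest with
        | nil => rfl
        | cons a t => simp [List.modifyHead]
      rw [hm, hm2, tok_cons_head, List.append_assoc]
    · simp only [List.foldl_cons, if_neg hc]
      rw [ih res (buf ++ [c])]
      have hm : (mySplit (c :: rest)).modifyHead (buf ++ ·)
          = (mySplit rest).modifyHead ((buf ++ [c]) ++ ·) := by
        simp only [mySplit, if_neg hc]
        cases h' : mySplit rest with
        | nil => rfl
        | cons a t => simp [List.modifyHead]
      rw [hm]

-- the outer loop of B: the buffer is empty between items
lemma outer (items : List String) : ∀ (res : List String),
    (items.foldl (fun (st : List String × List Char) item =>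
        let st2 := item.toList.foldl (fun (st : List String × List Char) ch =>
          if ch = ',' then (pvFlush st.1 st.2, []) else (st.1, st.2 ++ [ch])) st
        (pvFlush st2.1 st2.2, ([] : List Char))) (res, ([] : List Char))).1
      = res ++ items.flatMap (fun item => tok item.toList) := by
  induction items with
  | nil => intro res; simp
  | cons a rest ih =>
    intro res
    simp only [List.foldl_cons]
    have hs := scan a.toList res []
    have hm : (mySplit a.toList).modifyHead (([] : List Char) ++ ·) = mySplit a.toList := by
      cases h' : mySplit a.toList with
      | nil => rfl
      | cons x t => simp [List.modifyHead]
    rw [hm] at hs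
    rw [show (pvFlush
        ((a.toList.foldl (fun (st : List String × List Char) ch =>
          if ch = ',' then (pvFlush st.1 st.2, []) else (st.1, st.2 ++ [ch])) (res, ([] : List Char))).1)
        ((a.toList.foldl (fun (st : List String × List Char) ch =>
          if ch = ',' then (pvFlush st.1 st.2, []) else (st.1, st.2 ++ [ch])) (res, ([] : List Char))).2),
        ([] : List Char))
      = (res ++ tok a.toList, ([] : List Char)) by rw [Prod.mk.injEq]; exact ⟨hs, rfl⟩]
    rw [ih (res ++ tok a.toList)]
    simp [List.flatMap_cons, List.append_assoc]

-- ===== VERDICT (by name: the statement is the Claim_ definition above) =====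
theorem parse_urls_spec : Claim_equal_parse_urls := by
  intro raw_urls _
  unfold Spec_parse_urls parse_urls parse_urls_alt
  simp only [split_comma, inner_fold]
  rw [PySem.List.foldl_append_eq_flatMap
    (fun item => (((mySplit item.toList).map String.ofList).map PySem.Str.strip).filter (fun u => u ≠ "")) raw_urls []]
  rw [outer raw_urls []]
  simp [tok]
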